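-- pv_equiv track=rewrite | github.com/chutiankuo0121/ai-chunking | core/tools.py | _fix_latex_escapes
-- ===== SOURCE A (Python) =====
-- def _fix_latex_escapes(s: str) -> str:
--     """
--     修复 JSON 中的 LaTeX 反斜杠。
--
--     LLM 输出的 JSON 中常含 \\mathcal, \\overline 等 LaTeX 命令，
--     但 JSON 标准只允许 \\", \\\\, \\/, \\b, \\f, \\n, \\r, \\t, \\uXXXX。
--     其他 \\x 序列都是非法的，需要转成 \\\\x。
--     """
--     # 合法的 JSON 转义字符
--     valid_escapes = set('"\\bfnrtu/')
--     result = []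
--     i = 0
--     while i < len(s):
--         if s[i] == '\\' and i + 1 < len(s):
--             next_char = s[i + 1]
--             if next_char in valid_escapes:
--                 # 合法转义，保留原样
--                 result.append(s[i])
--                 result.append(next_char)
--                 i += 2
--             elif next_char == '\\':
--                 # 已经是双反斜杠，保留
--                 result.append('\\\\')
--                 i += 2
--             else:
--                 # 非法转义 (LaTeX 命令) → 加一个反斜杠
--                 result.append('\\\\')
--                 result.append(next_char)
--                 i += 2
--         else:
--             result.append(s[i])
--             i += 1
--     return ''.join(result)
-- ===== SOURCE B (Python) =====
-- import re
--
-- def _fix_latex_escapes(s: str) -> str: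
--     valid_escapes = set('"\\bfnrtu/')
--     def repl(m):
--         return m.group(0) if m.group(1) in valid_escapes else '\\\\' + m.group(1)
--     return re.sub(r'\\(.)', repl, s, flags=re.DOTALL)
-- ===== Notes on version B (the rewrite author's own statement) =====
-- stated objective: idiomatic
-- what changed: Replaces the hand-written index/while loop with result list by a single re.sub(r'\\(.)', repl, s, flags=re.DOTALL) pass whose callback keeps valid JSON escape pairs and doubles the backslash of invalid ones.
import Mathlib
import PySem

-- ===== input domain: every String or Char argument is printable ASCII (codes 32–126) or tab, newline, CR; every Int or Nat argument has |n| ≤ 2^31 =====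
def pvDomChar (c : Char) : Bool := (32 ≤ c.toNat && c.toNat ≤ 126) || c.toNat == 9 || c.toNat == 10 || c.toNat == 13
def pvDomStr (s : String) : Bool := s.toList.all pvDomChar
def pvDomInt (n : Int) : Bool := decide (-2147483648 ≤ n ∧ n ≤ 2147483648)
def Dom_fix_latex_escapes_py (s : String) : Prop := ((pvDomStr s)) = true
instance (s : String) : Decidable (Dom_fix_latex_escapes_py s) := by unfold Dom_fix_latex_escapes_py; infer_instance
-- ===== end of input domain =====

-- B replaces A's index-driven while loop by a single regex-substitution pass (more idiomatic); return values are proved equal.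

-- ===== PORT A =====
-- valid_escapes = set('"\\bfnrtu/')
def pvValidEscapes : List Char := ['"', '\\', 'b', 'f', 'n', 'r', 't', 'u', '/']

-- A's while loop: index i over the characters, result list accumulator
def pvLoopA (cs : List Char) (i : Nat) (acc : List Char) : List Char :=
  if h : i < cs.length then
    if cs[i] = '\\' ∧ i + 1 < cs.length then
      if h2 : i + 1 < cs.length then
        let nc := cs[i + 1]
        if nc ∈ pvValidEscapes then
          pvLoopA cs (i + 2) (acc ++ [cs[i], nc])
        else if nc = '\\' then
          pvLoopA cs (i + 2) (acc ++ ['\\', '\\'])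
        else
          pvLoopA cs (i + 2) (acc ++ ['\\', '\\', nc])
      else acc -- unreachable: guarded by the conjunct of the branch above
    else
      pvLoopA cs (i + 1) (acc ++ [cs[i]])
  else acc
termination_by cs.length - i

def fix_latex_escapes_py (s : String) : String :=
  String.ofList (pvLoopA s.toList 0 [])

-- ===== PORT B =====
-- re.sub(r'\\(.)', repl, s, flags=re.DOTALL): the regex engine consumes
-- backslash + any-char pairs greedily left to right (a trailing lone backslash
-- never matches); repl keeps the pair when the captured char is a valid JSON
-- escape and otherwise doubles the backslash. Exact port of that substitution
-- pass as first-match pattern recursion over the characters.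
def pvScanB : List Char → List Char
  | '\\' :: c :: rest =>
      if c ∈ pvValidEscapes then '\\' :: c :: pvScanB rest
      else '\\' :: '\\' :: c :: pvScanB rest
  | c :: rest => c :: pvScanB rest
  | [] => []

def fix_latex_escapes_py_alt (s : String) : String :=
  String.ofList (pvScanB s.toList)

-- ===== PRECONDITION & SPEC =====
def Spec_fix_latex_escapes_py (s : String) (out : String) : Prop := out = fix_latex_escapes_py_alt s
instance (s : String) (out : String) : Decidable (Spec_fix_latex_escapes_py s out) := by unfold Spec_fix_latex_escapes_py; infer_instance

-- ===== CLAIM (what is proved, stated in full; the proofs are below) =====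
def Claim_equal_fix_latex_escapes_py : Prop := ∀ (s : String), Dom_fix_latex_escapes_py s → Spec_fix_latex_escapes_py s (fix_latex_escapes_py s)

-- ===== LEMMAS AND PROOFS =====

-- equation lemmas for pvScanB on the shapes the main induction meets
theorem pvScanB_bs (c : Char) (rest : List Char) :
    pvScanB ('\\' :: c :: rest) =
      if c ∈ pvValidEscapes then '\\' :: c :: pvScanB rest
      else '\\' :: '\\' :: c :: pvScanB rest := rfl

theorem pvScanB_singleton (c : Char) : pvScanB [c] = [c] := by
  rw [pvScanB.eq_def]
  split
  · rename_i heq; simp at heq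
  · rename_i heq; injection heq with h1 h2; subst h1; subst h2; simp [pvScanB]
  · rename_i heq; simp at heq

theorem pvScanB_cons_ne (c : Char) (rest : List Char) (hc : c ≠ '\\') :
    pvScanB (c :: rest) = c :: pvScanB rest := by
  rw [pvScanB.eq_def]
  split
  · rename_i heq; injection heq with h1 _; exact absurd h1 hc
  · rename_i heq; injection heq with h1 h2; subst h1; subst h2; rfl
  · rename_i heq; simp at heq

-- A's loop from index i produces acc ++ B's scan of the remaining suffix
theorem pvLoopA_eq_scanB (n : Nat) : ∀ (cs : List Char) (i : Nat) (acc : List Char),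
    cs.length - i ≤ n → pvLoopA cs i acc = acc ++ pvScanB (cs.drop i) := by
  induction n with
  | zero =>
    intro cs i acc h
    have hi : cs.length ≤ i := by omega
    rw [pvLoopA]
    simp [Nat.not_lt.mpr hi, List.drop_eq_nil_of_le hi, pvScanB]
  | succ n ih =>
    intro cs i acc h
    rw [pvLoopA]
    by_cases hi : i < cs.length
    · simp only [hi, dif_pos]
      have hdrop : cs.drop i = cs[i] :: cs.drop (i + 1) := List.drop_eq_getElem_cons hi
      by_cases hb : cs[i] = '\\' ∧ i + 1 < cs.length
      · obtain ⟨hbs, h1⟩ := hb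
        have hdrop1 : cs.drop (i + 1) = cs[i + 1] :: cs.drop (i + 2) := List.drop_eq_getElem_cons h1
        simp only [hbs, h1, and_self, if_pos, dif_pos]
        rw [hdrop, hdrop1, hbs, pvScanB_bs]
        by_cases hv : cs[i + 1] ∈ pvValidEscapes
        · rw [if_pos hv, if_pos hv, ih cs (i + 2) _ (by omega)]
          simp
        · have hnb : cs[i + 1] ≠ '\\' := by
            intro hc; exact hv (by rw [hc]; decide)
          rw [if_neg hv, if_neg hv, if_neg hnb, ih cs (i + 2) _ (by omega)]
          simp
      · rw [if_neg hb, ih cs (i + 1) _ (by omega), hdrop]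
        rcases not_and_or.mp hb with hbs | h1
        · rw [pvScanB_cons_ne _ _ hbs]; simp
        · have h1' : cs.length ≤ i + 1 := by omega
          rw [List.drop_eq_nil_of_le h1', pvScanB_singleton]
          simp [pvScanB]
    · simp [hi, List.drop_eq_nil_of_le (Nat.not_lt.mp hi), pvScanB]

-- ===== VERDICT (by name: the statement is the Claim_ definition above) =====
theorem fix_latex_escapes_py_spec : Claim_equal_fix_latex_escapes_py := by
  intro s _
  unfold Spec_fix_latex_escapes_py fix_latex_escapes_py fix_latex_escapes_py_alt
  rw [pvLoopA_eq_scanB s.toList.length s.toList 0 [] (by omega)]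
  simp
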